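-- pv_equiv track=rewrite | github.com/wazuh/wazuh | tools/policy-migration/refactor_regex.py | swap_in_rn_tokens_brackets
-- ===== SOURCE A (Python) =====
-- from typing import List, Tuple, Set, Optional
--
-- def left_to_right_escape_unescaped_brackets(pattern: str, quote_char: Optional[str]) -> str:
--     """Escape unescaped '[' and ']' according to line quote style.
--     - Double-quoted line (quote_char == '"'): add two backslashes before bracket
--     - Single-quoted or unquoted: add one backslash before bracket
--     Leaves already escaped brackets as-is.
--     """
--     out: List[str] = []
--     i = 0
--     n = len(pattern)
--
--     def count_backslashes_before(index: int) -> int: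
--         cnt = 0
--         k = index - 1
--         while k >= 0 and pattern[k] == '\\':
--             cnt += 1
--             k -= 1
--         return cnt
--
--     while i < n:
--         ch = pattern[i]
--         if ch in ('[', ']'):
--             cnt = count_backslashes_before(i)
--             if quote_char == '"':
--                 # Consider escaped only if there are at least two preceding backslashes and the count is even (2, 4, ...)
--                 escaped = (cnt >= 2 and (cnt % 2 == 0))
--                 if not escaped:
--                     out.append('\\\\')
--                     out.append(ch)
--                     i += 1
--                     continue
--             else:
--                 # Single-quoted or unquoted: escaped if odd number of preceding backslashes
--                 escaped = (cnt % 2 == 1)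
--                 if not escaped:
--                     out.append('\\')
--                     out.append(ch)
--                     i += 1
--                     continue
--         out.append(ch)
--         i += 1
--     return ''.join(out)
--
-- def swap_in_rn_tokens_brackets(text: str, quote_char: Optional[str]) -> Tuple[str, bool]:
--     """Escape unescaped '[' and ']' only within r:/n:/!r:/!n: tokens.
--     Token ends at ' && ' or ' compare '. Returns (updated_text, changed_flag).
--     """
--     i = 0
--     s = text
--     out: List[str] = []
--     n = len(s)
--
--     def read_until_boundary(k: int) -> Tuple[str, int]:
--         j = k
--         while j < n and not (s.startswith(' && ', j) or s.startswith(' compare ', j)):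
--             j += 1
--         return s[k:j], j
--
--     while i < n:
--         if i + 2 < n and s[i] == '!' and s[i + 1] in ('r', 'n') and s[i + 2] == ':':
--             out.append(s[i:i+3])
--             i += 3
--             payload, next_i = read_until_boundary(i)
--             new_payload = left_to_right_escape_unescaped_brackets(payload, quote_char)
--             out.append(new_payload)
--             i = next_i
--             continue
--         if i + 1 < n and s[i] in ('r', 'n') and s[i + 1] == ':':
--             out.append(s[i:i+2])
--             i += 2
--             payload, next_i = read_until_boundary(i)
--             new_payload = left_to_right_escape_unescaped_brackets(payload, quote_char)
--             out.append(new_payload)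
--             i = next_i
--             continue
--         out.append(s[i])
--         i += 1
--
--     updated = ''.join(out)
--     return updated, (updated != text)
-- ===== SOURCE B (Python) =====
-- def swap_in_rn_tokens_brackets(text, quote_char):
--     """Flat state machine: one pass with an OUT/TOKEN state flag and a running
--     consecutive-backslash count; no payload slicing, no backward rescans."""
--     dq = quote_char == '"'
--     out = []
--     i = 0
--     n = len(text)
--     in_tok = False
--     run = 0
--     while i < n:
--         if in_tok:
--             if text.startswith(' && ', i) or text.startswith(' compare ', i):
--                 in_tok = False
--                 continue
--             c = text[i]
--             if c == '\\':
--                 run += 1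
--             else:
--                 if c == '[' or c == ']':
--                     if dq:
--                         if not (run >= 2 and run % 2 == 0):
--                             out.append('\\\\')
--                     elif run % 2 == 0:
--                         out.append('\\')
--                 run = 0
--             out.append(c)
--             i += 1
--         elif text.startswith('!r:', i) or text.startswith('!n:', i):
--             out.append(text[i:i + 3])
--             i += 3
--             in_tok = True
--             run = 0
--         elif text.startswith('r:', i) or text.startswith('n:', i):
--             out.append(text[i:i + 2])
--             i += 2
--             in_tok = True
--             run = 0
--         else:
--             out.append(text[i])
--             i += 1
--     updated = ''.join(out)
--     return updated, updated != text
-- ===== Notes on version B (the rewrite author's own statement) =====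
-- stated objective: alternative
-- what changed: Replaces A's per-bracket backward rescan (count_backslashes_before) and payload slicing with a flat two-state machine that walks the string once keeping a running consecutive-backslash count.
import Mathlib
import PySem

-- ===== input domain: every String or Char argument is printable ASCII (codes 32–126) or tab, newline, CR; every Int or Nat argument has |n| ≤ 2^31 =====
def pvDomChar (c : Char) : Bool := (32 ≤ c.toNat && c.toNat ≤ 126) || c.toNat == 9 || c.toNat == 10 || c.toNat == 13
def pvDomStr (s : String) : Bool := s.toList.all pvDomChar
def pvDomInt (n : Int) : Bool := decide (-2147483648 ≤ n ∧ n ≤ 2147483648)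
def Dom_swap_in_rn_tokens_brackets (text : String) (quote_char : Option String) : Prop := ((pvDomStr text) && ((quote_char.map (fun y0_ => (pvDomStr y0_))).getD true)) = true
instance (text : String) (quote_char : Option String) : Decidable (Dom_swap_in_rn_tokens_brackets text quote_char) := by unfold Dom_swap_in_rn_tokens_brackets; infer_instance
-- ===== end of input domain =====

-- B replaces A's slice-payload-then-escape-with-backward-rescans structure by a flat two-state
-- machine (OUT/TOKEN) with a running consecutive-backslash count (a different algorithm; not measured faster).

-- ===== PORT A =====

-- 'not (s.startswith(" && ", j) or s.startswith(" compare ", j))' boundary test on the suffix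
def pvBoundary (l : List Char) : Bool :=
  (" && ".toList.isPrefixOf l) || (" compare ".toList.isPrefixOf l)

-- read_until_boundary: returns (payload chars, remaining suffix)
def pvReadUntil : List Char → List Char × List Char
  | [] => ([], [])
  | c :: rest =>
    if pvBoundary (c :: rest) then ([], c :: rest)
    else
      let pr := pvReadUntil rest
      (c :: pr.1, pr.2)

-- count_backslashes_before: A scans backwards over the already-seen prefix while it reads '\';
-- the prefix is kept reversed here, so the backward while-loop is this forward scan (exact)
def pvCountBS : List Char → Nat
  | '\\' :: rest => pvCountBS rest + 1
  | _ => 0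

-- left_to_right_escape_unescaped_brackets: loop over the pattern, 'prev' is the reversed prefix
def pvEscA (q : Option String) : List Char → List Char → List Char
  | _, [] => []
  | prev, ch :: rest =>
    if ch = '[' ∨ ch = ']' then
      let cnt := pvCountBS prev
      if q = some "\"" then
        if cnt ≥ 2 ∧ cnt % 2 = 0 then ch :: pvEscA q (ch :: prev) rest
        else '\\' :: '\\' :: ch :: pvEscA q (ch :: prev) rest
      else
        if cnt % 2 = 1 then ch :: pvEscA q (ch :: prev) rest
        else '\\' :: ch :: pvEscA q (ch :: prev) rest
    else ch :: pvEscA q (ch :: prev) rest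

theorem pvReadUntil_len : ∀ l : List Char, (pvReadUntil l).2.length ≤ l.length := by
  intro l
  induction l with
  | nil => simp [pvReadUntil]
  | cons c rest ih =>
    simp only [pvReadUntil]
    split
    · simp
    · simpa using Nat.le_succ_of_le ih

-- main while-loop of A ('!x:' needs i+2 < n, i.e. three chars present; 'x:' needs i+1 < n)
def pvMainA (q : Option String) : List Char → List Char
  | '!' :: c :: ':' :: rest =>
    if c = 'r' ∨ c = 'n' then
      let pr := pvReadUntil rest
      '!' :: c :: ':' :: (pvEscA q [] pr.1 ++ pvMainA q pr.2)
    else '!' :: pvMainA q (c :: ':' :: rest)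
  | c :: ':' :: rest =>
    if c = 'r' ∨ c = 'n' then
      let pr := pvReadUntil rest
      c :: ':' :: (pvEscA q [] pr.1 ++ pvMainA q pr.2)
    else c :: pvMainA q (':' :: rest)
  | c :: rest => c :: pvMainA q rest
  | [] => []
termination_by l => l.length
decreasing_by
  · have := pvReadUntil_len rest; simp; omega
  · simp
  · have := pvReadUntil_len rest; simp; omega
  · simp
  · simp

def swap_in_rn_tokens_brackets (text : String) (quote_char : Option String) : String × Bool :=
  let updated := String.ofList (pvMainA quote_char text.toList)
  (updated, updated != text)

-- ===== PORT B =====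

-- B is a two-state machine; the two states are the two mutually recursive functions.
-- pvTokB = state in_tok=True: run is the running consecutive-backslash count; on boundary,
-- hand the unconsumed suffix back to the OUT state. pvOutB = state in_tok=False: the four
-- startswith token-openers as literal patterns, else copy one char.
mutual
def pvTokB (q : Option String) : Nat → List Char → List Char
  | _, [] => []
  | run, c :: rest =>
    if pvBoundary (c :: rest) then pvOutB q (c :: rest)
    else if c = '\\' then c :: pvTokB q (run + 1) rest
    else
      (if c = '[' ∨ c = ']' then
        if q = some "\"" then
          if run ≥ 2 ∧ run % 2 = 0 then ([] : List Char) else ['\\', '\\']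
        else if run % 2 = 0 then ['\\'] else []
      else []) ++ c :: pvTokB q 0 rest
termination_by run l => 2 * l.length + 1
decreasing_by all_goals (simp; try omega)

def pvOutB (q : Option String) : List Char → List Char
  | '!' :: 'r' :: ':' :: rest => '!' :: 'r' :: ':' :: pvTokB q 0 rest
  | '!' :: 'n' :: ':' :: rest => '!' :: 'n' :: ':' :: pvTokB q 0 rest
  | 'r' :: ':' :: rest => 'r' :: ':' :: pvTokB q 0 rest
  | 'n' :: ':' :: rest => 'n' :: ':' :: pvTokB q 0 rest
  | c :: rest => c :: pvOutB q rest
  | [] => []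
termination_by l => 2 * l.length
decreasing_by all_goals (simp; try omega)
end

def swap_in_rn_tokens_brackets_alt (text : String) (quote_char : Option String) : String × Bool :=
  let updated := String.ofList (pvOutB quote_char text.toList)
  (updated, updated != text)

-- ===== PRECONDITION & SPEC =====
def Spec_swap_in_rn_tokens_brackets (text : String) (quote_char : Option String) (out : String × Bool) : Prop := out = swap_in_rn_tokens_brackets_alt text quote_char
instance (text : String) (quote_char : Option String) (out : String × Bool) : Decidable (Spec_swap_in_rn_tokens_brackets text quote_char out) := by unfold Spec_swap_in_rn_tokens_brackets; infer_instance

-- ===== CLAIM =====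
def Claim_equal_swap_in_rn_tokens_brackets : Prop := ∀ (text : String) (quote_char : Option String), Dom_swap_in_rn_tokens_brackets text quote_char → Spec_swap_in_rn_tokens_brackets text quote_char (swap_in_rn_tokens_brackets text quote_char)

-- ===== LEMMAS AND PROOFS =====

-- TOKEN state with run = trailing-backslash count of the (reversed) seen prefix equals
-- "extract the payload, escape it, hand the rest to the OUT state"
theorem pvTokB_eq (q : Option String) :
    ∀ (l prev : List Char),
      pvTokB q (pvCountBS prev) l = pvEscA q prev (pvReadUntil l).1 ++ pvOutB q (pvReadUntil l).2 := by
  intro l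
  induction l with
  | nil => intro prev; simp [pvTokB, pvReadUntil, pvEscA, pvOutB]
  | cons c rest ih =>
    intro prev
    simp only [pvTokB, pvReadUntil]
    by_cases hb : pvBoundary (c :: rest) = true
    · simp [hb, pvEscA]
    · simp only [hb, if_false, Bool.false_eq_true]
      by_cases hbs : c = '\\'
      · subst hbs
        have hc : pvCountBS ('\\' :: prev) = pvCountBS prev + 1 := by simp [pvCountBS]
        have := ih ('\\' :: prev)
        rw [hc] at this
        simp [this, pvEscA]
      · have hc : pvCountBS (c :: prev) = 0 := by
          rw [pvCountBS.eq_def]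
          split
          · next heq => injection heq with h1 _; exact absurd h1 hbs
          · rfl
        have := ih (c :: prev)
        rw [hc] at this
        by_cases hbr : c = '[' ∨ c = ']'
        · by_cases hq : q = some "\""
          · subst hq
            by_cases he : pvCountBS prev ≥ 2 ∧ pvCountBS prev % 2 = 0
            · simp [hbs, hbr, he, this, pvEscA]
            · simp [hbs, hbr, he, this, pvEscA]
          · by_cases he : pvCountBS prev % 2 = 1
            · have h0 : ¬ pvCountBS prev % 2 = 0 := by omega
              simp [hbs, hbr, hq, he, h0, this, pvEscA]
            · have h0 : pvCountBS prev % 2 = 0 := by omega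
              simp [hbs, hbr, hq, he, h0, this, pvEscA]
        · simp [hbs, hbr, this, pvEscA]

theorem pvTokB_zero (q : Option String) (rest : List Char) :
    pvTokB q 0 rest = pvEscA q [] (pvReadUntil rest).1 ++ pvOutB q (pvReadUntil rest).2 := by
  simpa [pvCountBS] using pvTokB_eq q rest []

-- the OUT state is A's main loop
theorem pvMain_eq (q : Option String) : ∀ l : List Char, pvMainA q l = pvOutB q l := by
  intro l
  induction l using pvMainA.induct with
  | case1 c rest h pr ih =>
      rcases h with h | h <;> subst h <;> simp [pvMainA, pvOutB, pvTokB_zero] <;> exact ih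
  | case2 c rest h ih =>
      simp only [pvMainA, h, if_false, ih]
      conv_rhs => rw [pvOutB.eq_def]
      split <;> simp_all <;> tauto
  | case3 c rest h1 h2 pr ih =>
      rcases h2 with h | h <;> subst h <;> simp [pvMainA, pvOutB, pvTokB_zero] <;> exact ih
  | case4 c rest h1 h2 ih =>
      simp only [pvMainA, h2, if_false, ih]
      conv_rhs => rw [pvOutB.eq_def]
      split <;> simp_all
  | case5 c rest h1 h2 ih =>
      simp only [pvMainA, ih]
      conv_rhs => rw [pvOutB.eq_def]
      split <;> simp_all <;> tauto
  | case6 => simp [pvMainA, pvOutB]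

-- ===== VERDICT =====
theorem swap_in_rn_tokens_brackets_spec : Claim_equal_swap_in_rn_tokens_brackets := by
  intro text quote_char _
  unfold Spec_swap_in_rn_tokens_brackets swap_in_rn_tokens_brackets swap_in_rn_tokens_brackets_alt
  rw [pvMain_eq]
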